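-- pv_equiv track=rewrite | github.com/niharshah/AIScientistPitfalls | AI Scientist v2/generated_research/MetricMisuse/shape-flip/shape first/5/logs/0-run/experiment_results/experiment_0fed72df1e084fb5a19ad0492a0c3cb1_proc_2678329/experiment_code.py | build_vocab_and_maps
-- ===== SOURCE A (Python) =====
-- def build_vocab_and_maps(dataset):
--     vocab = {"<pad>": 0, "<unk>": 1}
--     shape_set, color_set = set(), set()
--     for seq in dataset["sequence"]:
--         for tok in seq.strip().split():
--             if tok not in vocab:
--                 vocab[tok] = len(vocab)
--             if len(tok) >= 1:
--                 shape_set.add(tok[0])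
--             if len(tok) >= 2:
--                 color_set.add(tok[1])
--     shape_map = {s: i for i, s in enumerate(sorted(shape_set))}
--     color_map = {c: i for i, c in enumerate(sorted(color_set))}
--     return vocab, shape_map, color_map
-- ===== SOURCE B (Python) =====
-- def _distinct_sorted(cs):
--     # Adjacent-run dedup of a sorted list: take the head of each run of
--     # equal elements and skip past the run.
--     out = []
--     while cs:
--         c = cs[0]
--         k = 1
--         while k < len(cs) and cs[k] == c:
--             k += 1
--         out.append(c)
--         cs = cs[k:]
--     return out
--
--
-- def _rank_map(chars):
--     # Rank map of a multiset of characters: sort the whole multiset, then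
--     # collapse adjacent runs; rank = position among the distinct values.
--     return {c: i for i, c in enumerate(_distinct_sorted(sorted(chars)))}
--
--
-- def build_vocab_and_maps(dataset):
--     toks = [t for seq in dataset["sequence"] for t in seq.strip().split()]
--     # Vocab: ordered dedup of the token stream via dict.fromkeys, then a
--     # single enumeration assigns ids 2.. to the non-special tokens.
--     order = [t for t in dict.fromkeys(toks) if t not in ("<pad>", "<unk>")]
--     vocab = {"<pad>": 0, "<unk>": 1}
--     for i, t in enumerate(order):
--         vocab[t] = i + 2
--     # Shape/color maps: sort the raw character multisets, no sets maintained.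
--     shape_map = _rank_map([t[0] for t in toks if t])
--     color_map = _rank_map([t[1] for t in toks if len(t) >= 2])
--     return vocab, shape_map, color_map
-- ===== Notes on version B (the rewrite author's own statement) =====
-- stated objective: alternative
-- what changed: A maintains a growing vocab dict and two hash sets inside one fused nested loop and finally sorts the small sets; B flattens the tokens once, obtains the vocab order by a dict.fromkeys ordered dedup followed by a single enumeration, and builds each character map by sorting the raw character multiset and collapsing adjacent runs - no sets are maintained at all.
import Mathlib
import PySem

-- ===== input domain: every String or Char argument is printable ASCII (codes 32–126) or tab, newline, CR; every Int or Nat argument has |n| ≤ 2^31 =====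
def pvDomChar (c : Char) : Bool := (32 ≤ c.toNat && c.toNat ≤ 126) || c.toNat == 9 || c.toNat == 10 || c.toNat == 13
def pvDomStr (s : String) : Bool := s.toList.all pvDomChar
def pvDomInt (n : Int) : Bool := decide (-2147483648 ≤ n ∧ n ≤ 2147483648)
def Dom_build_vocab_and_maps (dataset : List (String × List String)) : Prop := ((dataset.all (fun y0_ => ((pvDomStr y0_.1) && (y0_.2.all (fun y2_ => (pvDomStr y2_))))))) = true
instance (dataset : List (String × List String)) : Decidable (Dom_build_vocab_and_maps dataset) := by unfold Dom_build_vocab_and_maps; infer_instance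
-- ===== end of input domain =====

-- B replaces A's fused loop (vocab dict + two hash sets, sets sorted at the end) by staged
-- passes: a dict.fromkeys ordered dedup + one enumeration for the vocab, and sort-the-multiset
-- + adjacent-run dedup for each character map; objective: alternative algorithm, same results.

-- ===== PORT A =====
-- one loop iteration over a token: update vocab, shape_set, color_set together
def bvmAStep (st : PySem.Dict String Int × PySem.Set Char × PySem.Set Char) (tok : String) :
    PySem.Dict String Int × PySem.Set Char × PySem.Set Char :=
  let v := if st.1.contains tok then st.1 else st.1.insert tok (st.1.size : Int)
  let s := if 1 ≤ PySem.Str.len tok then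
             match PySem.Str.pyGet? tok 0 with
             | some c => PySem.Set.add st.2.1 c
             | none => st.2.1
           else st.2.1
  let c := if 2 ≤ PySem.Str.len tok then
             match PySem.Str.pyGet? tok 1 with
             | some ch => PySem.Set.add st.2.2 ch
             | none => st.2.2
           else st.2.2
  (v, s, c)

-- {x: i for i, x in enumerate(sorted(set_of_chars))}; Chars represent Python's 1-char strings
def bvmEnumMap (s : PySem.Set Char) : List (String × Int) :=
  (PySem.List.enumerate (PySem.List.sorted s (fun x => x) false)).map
    (fun p => (String.ofList [p.2], p.1))

def build_vocab_and_maps (dataset : List (String × List String)) : (List (String × Int)) × (List (String × Int)) × (List (String × Int)) :=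
  let seqs := (dataset.lookup "sequence").getD []   -- dataset["sequence"]; Pre_ excludes the KeyError
  let init : PySem.Dict String Int := (PySem.Dict.empty.insert "<pad>" 0).insert "<unk>" 1
  let st := seqs.foldl
    (fun st seq => (PySem.Str.split₀ (PySem.Str.strip seq)).foldl bvmAStep st)
    (init, PySem.Set.empty, PySem.Set.empty)
  (st.1.items, bvmEnumMap st.2.1, bvmEnumMap st.2.2)

-- ===== PORT B =====
-- _distinct_sorted: the inner while advances k past the run of elements equal to cs[0],
-- so cs[k:] is exactly dropping that run (dropWhile); the outer while is this recursion.
def bvmDedupRuns : List Char → List Char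
  | [] => []
  | c :: rest => c :: bvmDedupRuns (rest.dropWhile (· == c))
  termination_by l => l.length
  decreasing_by
    simpa [Nat.lt_succ_iff] using List.length_dropWhile_le (· == c) rest

-- _rank_map: sort the multiset, collapse runs, enumerate
def bvmRankMap (chars : List Char) : List (String × Int) :=
  (PySem.List.enumerate (bvmDedupRuns (PySem.List.sorted chars (fun x => x) false))).map
    (fun p => (String.ofList [p.2], p.1))

def build_vocab_and_maps_alt (dataset : List (String × List String)) : (List (String × Int)) × (List (String × Int)) × (List (String × Int)) :=
  let seqs := (dataset.lookup "sequence").getD []   -- dataset["sequence"]; Pre_ excludes the KeyError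
  let toks := seqs.flatMap (fun seq => PySem.Str.split₀ (PySem.Str.strip seq))
  let order := (PySem.List.dedup toks).filter (fun t => !(t == "<pad>" || t == "<unk>"))
  let init : PySem.Dict String Int := (PySem.Dict.empty.insert "<pad>" 0).insert "<unk>" 1
  let vocab := (PySem.List.enumerate order).foldl (fun v p => v.insert p.2 (p.1 + 2)) init
  let shape_map := bvmRankMap ((toks.filter (fun t => !(t == ""))).filterMap (fun t => PySem.Str.pyGet? t 0))
  let color_map := bvmRankMap ((toks.filter (fun t => decide (2 ≤ PySem.Str.len t))).filterMap (fun t => PySem.Str.pyGet? t 1))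
  (vocab.items, shape_map, color_map)

-- ===== PRECONDITION & SPEC =====
-- Pre_ excludes exactly the dicts without a "sequence" key, on which A (and B) raise KeyError.
def Pre_build_vocab_and_maps (dataset : List (String × List String)) : Prop :=
  (dataset.lookup "sequence").isSome = true
instance (dataset : List (String × List String)) : Decidable (Pre_build_vocab_and_maps dataset) := by unfold Pre_build_vocab_and_maps; infer_instance

def pvWitness_build_vocab_and_maps : (List (String × List String)) := [("sequence", ["sB cR", "x"])]

def Spec_build_vocab_and_maps (dataset : List (String × List String)) (out : (List (String × Int)) × (List (String × Int)) × (List (String × Int))) : Prop := out = build_vocab_and_maps_alt dataset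
instance (dataset : List (String × List String)) (out : (List (String × Int)) × (List (String × Int)) × (List (String × Int))) : Decidable (Spec_build_vocab_and_maps dataset out) := by unfold Spec_build_vocab_and_maps; infer_instance

-- ===== CLAIM (what is proved, stated in full; the proofs are below) =====
def Claim_equal_build_vocab_and_maps : Prop := ∀ (dataset : List (String × List String)), Dom_build_vocab_and_maps dataset → Pre_build_vocab_and_maps dataset → Spec_build_vocab_and_maps dataset (build_vocab_and_maps dataset)

-- ===== LEMMAS AND PROOFS =====

-- the three independent components of A's fused loop step
def bvmStepV (d : PySem.Dict String Int) (t : String) : PySem.Dict String Int :=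
  if d.contains t then d else d.insert t (d.size : Int)
def bvmStepS (s : PySem.Set Char) (t : String) : PySem.Set Char :=
  if 1 ≤ PySem.Str.len t then
    match PySem.Str.pyGet? t 0 with
    | some c => PySem.Set.add s c
    | none => s
  else s
def bvmStepC (s : PySem.Set Char) (t : String) : PySem.Set Char :=
  if 2 ≤ PySem.Str.len t then
    match PySem.Str.pyGet? t 1 with
    | some c => PySem.Set.add s c
    | none => s
  else s

lemma bvmAStep_foldl_decomp (toks : List String)
    (v : PySem.Dict String Int) (s c : PySem.Set Char) :
    toks.foldl bvmAStep (v, s, c) =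
      (toks.foldl bvmStepV v, toks.foldl bvmStepS s, toks.foldl bvmStepC c) := by
  induction toks generalizing v s c with
  | nil => rfl
  | cons t ts ih =>
    simp only [List.foldl_cons]
    exact ih _ _ _

lemma bvmContains_stepV (d : PySem.Dict String Int) (t x : String) :
    (bvmStepV d t).contains x = (x == t || d.contains x) := by
  unfold bvmStepV
  split_ifs with h
  · by_cases hx : x = t
    · subst hx; simp [h]
    · simp [hx]
  · exact PySem.Dict.contains_insert d t x _

def bvmInit : PySem.Dict String Int := (PySem.Dict.empty.insert "<pad>" 0).insert "<unk>" 1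

lemma bvmVocabA (toks : List String) :
    (toks.foldl bvmStepV bvmInit).items =
        bvmInit.items ++ (PySem.List.enumerate (((PySem.List.dedup toks).filter (fun t => !(t == "<pad>" || t == "<unk>")))) 2).map (fun p => (p.2, p.1))
    ∧ (toks.foldl bvmStepV bvmInit).size = 2 + ((PySem.List.dedup toks).filter (fun t => !(t == "<pad>" || t == "<unk>"))).length
    ∧ ∀ x, (toks.foldl bvmStepV bvmInit).contains x = (x == "<pad>" || x == "<unk>" || decide (x ∈ toks)) := by
  induction toks using List.reverseRecOn with
  | nil =>
    refine ⟨by simp [PySem.List.enumerate_nil], by decide, ?_⟩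
    intro x
    simp only [List.foldl_nil, bvmInit, PySem.Dict.contains_insert, PySem.Dict.contains_empty,
      List.not_mem_nil, decide_false, Bool.or_false]
    cases hp : x == "<pad>" <;> cases hu : x == "<unk>" <;> simp
  | append_singleton ts t ih =>
    obtain ⟨ih1, ih2, ih3⟩ := ih
    rw [List.foldl_append,
      show List.foldl bvmStepV (List.foldl bvmStepV bvmInit ts) [t]
         = bvmStepV (List.foldl bvmStepV bvmInit ts) t from rfl]
    have hded : PySem.List.dedup (ts ++ [t]) =
        if t ∈ ts then PySem.List.dedup ts else PySem.List.dedup ts ++ [t] := by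
      rw [PySem.List.dedup_eq_ofList, PySem.Set.ofList_append_singleton, PySem.Set.add_eq_ite,
        ← PySem.List.dedup_eq_ofList]
      simp [PySem.Set.mem_ofList, PySem.List.dedup_eq_ofList]
    have hc : ∀ x, (bvmStepV (ts.foldl bvmStepV bvmInit) t).contains x =
        (x == "<pad>" || x == "<unk>" || decide (x ∈ ts ++ [t])) := by
      intro x
      rw [bvmContains_stepV, ih3]
      simp only [List.mem_append, List.mem_singleton]
      by_cases hp : x = "<pad>" <;> by_cases hu : x = "<unk>" <;>
        by_cases ht : x = t <;> by_cases hm : x ∈ ts <;> simp_all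
    by_cases hct : (ts.foldl bvmStepV bvmInit).contains t = true
    · have hstep : bvmStepV (ts.foldl bvmStepV bvmInit) t = ts.foldl bvmStepV bvmInit := by
        rw [bvmStepV, if_pos hct]
      rw [hstep]
      have hfilter : (PySem.List.dedup (ts ++ [t])).filter (fun t => !(t == "<pad>" || t == "<unk>")) =
          (PySem.List.dedup ts).filter (fun t => !(t == "<pad>" || t == "<unk>")) := by
        rw [hded]
        by_cases hmem : t ∈ ts
        · rw [if_pos hmem]
        · rw [if_neg hmem, List.filter_append]
          have h2 := ih3 t
          rw [hct] at h2
          have h3 := h2.symm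
          have hsp : (t == "<pad>" || t == "<unk>") = true := by
            cases hpad : (t == "<pad>") with
            | true => simp
            | false =>
              cases hunk : (t == "<unk>") with
              | true => simp
              | false =>
                exfalso
                rw [hpad, hunk] at h3
                simp at h3
                exact hmem h3
          simp only [List.filter_cons, List.filter_nil]
          have hpred : (!(t == "<pad>" || t == "<unk>")) = false := by simp [hsp]
          simp [hpred]
      rw [hfilter]
      refine ⟨ih1, ih2, ?_⟩
      intro x
      rw [← hstep]
      exact hc x
    · have hct' : (ts.foldl bvmStepV bvmInit).contains t = false := by
        simpa using hct
      have h2 := ih3 t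
      rw [hct'] at h2
      have h3 := h2.symm
      simp only [Bool.or_eq_false_iff, decide_eq_false_iff_not] at h3
      have hparts : ¬ t ∈ ts ∧ (t == "<pad>" || t == "<unk>") = false :=
        ⟨h3.2, by rw [Bool.or_eq_false_iff]; exact ⟨h3.1.1, h3.1.2⟩⟩
      have hstep : bvmStepV (ts.foldl bvmStepV bvmInit) t =
          (ts.foldl bvmStepV bvmInit).insert t ((ts.foldl bvmStepV bvmInit).size : Int) := by
        rw [bvmStepV, if_neg hct]
      have hfilter : (PySem.List.dedup (ts ++ [t])).filter (fun t => !(t == "<pad>" || t == "<unk>")) =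
          (PySem.List.dedup ts).filter (fun t => !(t == "<pad>" || t == "<unk>")) ++ [t] := by
        rw [hded, if_neg hparts.1, List.filter_append]
        have hpred : (!(t == "<pad>" || t == "<unk>")) = true := by rw [hparts.2]; rfl
        simp only [List.filter_cons, List.filter_nil, hpred, if_true]
      rw [hstep, hfilter]
      refine ⟨?_, ?_, fun x => by rw [← hstep]; exact hc x⟩
      · rw [PySem.Dict.items_insert_of_not_contains _ _ hct', ih1,
          PySem.List.enumerate_append]
        simp only [PySem.List.enumerate_cons, PySem.List.enumerate_nil, List.map_append,
          List.map_cons, List.map_nil, List.append_assoc]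
        congr 3
        rw [ih2]
        push_cast
        ring_nf
      · rw [PySem.Dict.size_insert, if_neg hct, ih2]
        simp
        omega
  

lemma bvmEnumShift {α : Type} (l : List α) (a b : Int) :
    PySem.List.enumerate l (a + b) = (PySem.List.enumerate l a).map (fun p => (p.1 + b, p.2)) := by
  induction l generalizing a with
  | nil => simp [PySem.List.enumerate_nil]
  | cons x xs ih =>
    simp only [PySem.List.enumerate_cons, List.map_cons]
    rw [show a + b + 1 = (a + 1) + b by ring, ih]

lemma bvmVocabB (toks : List String) :
    ((PySem.List.enumerate ((PySem.List.dedup toks).filter (fun t => !(t == "<pad>" || t == "<unk>")))).foldl (fun v p => v.insert p.2 (p.1 + 2)) bvmInit).items =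
      bvmInit.items ++ (PySem.List.enumerate ((PySem.List.dedup toks).filter (fun t => !(t == "<pad>" || t == "<unk>"))) 2).map (fun p => (p.2, p.1)) := by
  set order := (PySem.List.dedup toks).filter (fun t => !(t == "<pad>" || t == "<unk>")) with horder
  have hfresh : ∀ p ∈ PySem.List.enumerate order, bvmInit.contains ((fun (p : Int × String) => p.2) p) = false := by
    intro p hp
    have hmem : p.2 ∈ order := by
      have := List.mem_map_of_mem (f := fun (q : Int × String) => q.2) hp
      rwa [PySem.List.map_snd_enumerate] at this
    have hpred := (List.mem_filter.mp (horder ▸ hmem)).2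
    simp only [Bool.not_eq_eq_eq_not, Bool.not_true, Bool.or_eq_false_iff, beq_eq_false_iff_ne] at hpred
    simp [bvmInit, PySem.Dict.contains_insert, hpred.1, hpred.2, PySem.Dict.empty]
  have hnodup : (List.map (fun (p : Int × String) => p.2) (PySem.List.enumerate order)).Nodup := by
    rw [PySem.List.map_snd_enumerate]
    exact List.Nodup.filter _ (PySem.List.nodup_dedup toks)
  have hmain := PySem.Dict.items_foldl_insert_fresh (PySem.List.enumerate order)
      (fun (p : Int × String) => p.2) (fun p => p.1 + 2) bvmInit hfresh hnodup
  rw [hmain]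
  congr 1
  rw [show (2 : Int) = 0 + 2 from rfl, bvmEnumShift, List.map_map]
  rfl

-- length facts about indexing tokens
lemma bvmLen1_of_pyGet0 (t : String) (c : Char) (h : PySem.Str.pyGet? t 0 = some c) :
    1 ≤ PySem.Str.len t := by
  have h' : PySem.List.pyGet? t.toList 0 = some c := by simpa [PySem.Str.pyGet?] using h
  rw [PySem.Str.len_eq]
  cases hl : t.toList with
  | nil => rw [hl] at h'; simp [PySem.List.pyGet?, PySem.List.pyIdx?] at h'
  | cons a l => simp

lemma bvmLen2_of_pyGet1 (t : String) (c : Char) (h : PySem.Str.pyGet? t 1 = some c) :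
    2 ≤ PySem.Str.len t := by
  have h' : PySem.List.pyGet? t.toList 1 = some c := by simpa [PySem.Str.pyGet?] using h
  rw [PySem.Str.len_eq]
  match hl : t.toList with
  | [] => rw [hl] at h'; simp [PySem.List.pyGet?, PySem.List.pyIdx?] at h'
  | [a] => rw [hl] at h'; simp [PySem.List.pyGet?, PySem.List.pyIdx?] at h'
  | a :: b :: l => simp; omega

lemma bvmPyGet1_none (t : String) (h : ¬ 2 ≤ PySem.Str.len t) :
    PySem.Str.pyGet? t 1 = none := by
  rw [PySem.Str.len_eq] at h
  have hl : t.toList.length ≤ 1 := by omega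
  match hm : t.toList with
  | [] => simp [PySem.Str.pyGet?, hm, PySem.List.pyGet?, PySem.List.pyIdx?]
  | [a] => simp [PySem.Str.pyGet?, hm, PySem.List.pyGet?, PySem.List.pyIdx?]
  | a :: b :: l => rw [hm] at hl; simp at hl

lemma bvmPyGet0_none (t : String) (h : t = "") : PySem.Str.pyGet? t 0 = none := by
  subst h; rfl

-- guarded comprehension = filterMap when the guard only removes elements the map drops anyway
lemma bvmFilterMap_filter_noop {α β : Type} (l : List α) (p : α → Bool) (f : α → Option β)
    (h : ∀ x, p x = false → f x = none) :
    (l.filter p).filterMap f = l.filterMap f := by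
  induction l with
  | nil => rfl
  | cons x xs ih =>
    by_cases hp : p x = true
    · simp [hp, List.filterMap_cons, ih]
    · have := h x (by simpa using hp)
      simp [hp, this, ih]

lemma bvmStepS_fold (toks : List String) (s : PySem.Set Char) :
    toks.foldl bvmStepS s = (toks.filterMap (fun t => PySem.Str.pyGet? t 0)).foldl PySem.Set.add s := by
  induction toks generalizing s with
  | nil => rfl
  | cons t ts ih =>
    cases h : PySem.Str.pyGet? t 0 with
    | none =>
      have h' : PySem.List.pyGet? t.toList 0 = none := by simpa [PySem.Str.pyGet?] using h
      have hs : bvmStepS s t = s := by unfold bvmStepS; split_ifs <;> simp [h']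
      simp [h', hs, ih]
    | some c =>
      have h' : PySem.List.pyGet? t.toList 0 = some c := by simpa [PySem.Str.pyGet?] using h
      have hs : bvmStepS s t = PySem.Set.add s c := by
        unfold bvmStepS
        rw [if_pos (bvmLen1_of_pyGet0 t c h)]
        simp [PySem.Str.pyGet?, h']
      simp [h', hs, ih]

lemma bvmStepC_fold (toks : List String) (s : PySem.Set Char) :
    toks.foldl bvmStepC s = (toks.filterMap (fun t => PySem.Str.pyGet? t 1)).foldl PySem.Set.add s := by
  induction toks generalizing s with
  | nil => rfl
  | cons t ts ih =>
    cases h : PySem.Str.pyGet? t 1 with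
    | none =>
      have h' : PySem.List.pyGet? t.toList 1 = none := by simpa [PySem.Str.pyGet?] using h
      have hs : bvmStepC s t = s := by unfold bvmStepC; split_ifs <;> simp [h']
      simp [h', hs, ih]
    | some c =>
      have h' : PySem.List.pyGet? t.toList 1 = some c := by simpa [PySem.Str.pyGet?] using h
      have hs : bvmStepC s t = PySem.Set.add s c := by
        unfold bvmStepC
        rw [if_pos (bvmLen2_of_pyGet1 t c h)]
        simp [PySem.Str.pyGet?, h']
      simp [h', hs, ih]

-- dedupRuns facts
lemma bvmDedupRuns_mem (l : List Char) (a : Char) : a ∈ bvmDedupRuns l ↔ a ∈ l := by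
  induction l using bvmDedupRuns.induct with
  | case1 => simp [bvmDedupRuns]
  | case2 c rest ih =>
    rw [bvmDedupRuns]
    simp only [List.mem_cons, ih]
    constructor
    · rintro (rfl | hmem)
      · exact Or.inl rfl
      · exact Or.inr ((List.dropWhile_sublist _).subset hmem)
    · rintro (rfl | hmem)
      · exact Or.inl rfl
      · rcases List.mem_append.mp
          ((List.takeWhile_append_dropWhile (p := (· == c)) (l := rest)) ▸ hmem) with h1 | h2
        · exact Or.inl (by simpa using List.mem_takeWhile_imp h1)
        · exact Or.inr h2

lemma bvmDropWhile_lt (rest : List Char) (c : Char) (hs : rest.Pairwise (· ≤ ·))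
    (hge : ∀ x ∈ rest, c ≤ x) : ∀ x ∈ rest.dropWhile (· == c), c < x := by
  induction rest with
  | nil => simp
  | cons d rs ih =>
    by_cases hd : (d == c) = true
    · rw [List.dropWhile_cons]
      simp only [hd, if_true]
      exact ih (List.Pairwise.of_cons hs) (fun x hx => hge x (List.mem_cons_of_mem _ hx))
    · rw [Bool.not_eq_true] at hd
      rw [List.dropWhile_cons]
      simp only [hd, Bool.false_eq_true, if_false]
      intro x hx
      have hne : c ≠ d := fun he => by simp [he] at hd
      have hcd : c < d := lt_of_le_of_ne (hge d (List.mem_cons_self)) hne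
      rcases List.mem_cons.mp hx with rfl | hx'
      · exact hcd
      · exact lt_of_lt_of_le hcd ((List.pairwise_cons.mp hs).1 x hx')

lemma bvmDedupRuns_pairwise (l : List Char) (h : l.Pairwise (· ≤ ·)) :
    (bvmDedupRuns l).Pairwise (· < ·) := by
  induction l using bvmDedupRuns.induct with
  | case1 => simp [bvmDedupRuns]
  | case2 c rest ih =>
    rw [bvmDedupRuns]
    have hrest := List.pairwise_cons.mp h
    refine List.pairwise_cons.mpr ⟨?_, ih (hrest.2.sublist (List.dropWhile_sublist _))⟩
    intro x hx
    exact bvmDropWhile_lt rest c hrest.2 hrest.1 x ((bvmDedupRuns_mem _ _).mp hx)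

-- sorted(set(chars)) is the adjacent-run dedup of sorted(chars)
lemma bvmSortedSet_eq (chars : List Char) :
    PySem.List.sorted (PySem.Set.ofList chars) (fun x => x) false =
      bvmDedupRuns (PySem.List.sorted chars (fun x => x) false) := by
  have hpw : (bvmDedupRuns (PySem.List.sorted chars (fun x => x) false)).Pairwise (· < ·) :=
    bvmDedupRuns_pairwise _ (PySem.List.sorted_pairwise chars (fun x => x))
  apply PySem.List.sorted_eq_of_perm_of_pairwise_lt
  · refine (List.perm_ext_iff_of_nodup (hpw.imp fun h => ne_of_lt h) (PySem.Set.nodup_ofList chars)).mpr ?_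
    intro a
    rw [bvmDedupRuns_mem, PySem.List.mem_sorted, PySem.Set.mem_ofList]
  · exact hpw

-- ===== VERDICT (by name: the statement is the Claim_ definition above) =====
theorem build_vocab_and_maps_spec : Claim_equal_build_vocab_and_maps := by
  intro dataset _ _
  unfold Spec_build_vocab_and_maps build_vocab_and_maps build_vocab_and_maps_alt
  simp only
  rw [← List.foldl_flatMap, bvmAStep_foldl_decomp]
  rw [Prod.mk.injEq, Prod.mk.injEq]
  refine ⟨?_, ?_, ?_⟩
  · exact ((bvmVocabA _).1).trans (bvmVocabB _).symm
  · rw [bvmStepS_fold]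
    simp only [PySem.Set.empty]
    rw [← PySem.Set.ofList_eq_foldl,
      bvmFilterMap_filter_noop _ _ _
        (fun t ht => bvmPyGet0_none t (by simpa using ht))]
    unfold bvmEnumMap bvmRankMap
    rw [bvmSortedSet_eq]
  · rw [bvmStepC_fold]
    simp only [PySem.Set.empty]
    rw [← PySem.Set.ofList_eq_foldl,
      bvmFilterMap_filter_noop _ _ _
        (fun t ht => bvmPyGet1_none t (by simpa using ht))]
    unfold bvmEnumMap bvmRankMap
    rw [bvmSortedSet_eq]
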